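-- pv_equiv track=rewrite | github.com/menacepicks/mlb | mlb_betting_data/sportsbooks/draftkings.py | _keep_row_market
-- ===== SOURCE A (Python) =====
-- from typing import Any, Iterable
--
-- def _keep_row_market(market: str) -> bool:
--     text = _norm_text(market)
--     banned = (
--         "series",
--         "award",
--         "awards",
--         "special",
--         "specials",
--         "conference",
--         "season",
--         "champion",
--         "rookie of the year",
--         "cy young",
--         "mvp",
--     )
--     return not any(token in text for token in banned)
--
-- def _norm_text(value: Any) -> str:
--     if value is None:
--         return ""
--     text = str(value).strip().lower()
--     for token in ["-", "_", "/", ".", ",", "(", ")"]: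
--         text = text.replace(token, " ")
--     return " ".join(text.split())
-- ===== SOURCE B (Python) =====
-- _BANNED = (
--     "series",
--     "award",
--     "awards",
--     "special",
--     "specials",
--     "conference",
--     "season",
--     "champion",
--     "rookie of the year",
--     "cy young",
--     "mvp",
-- )
--
--
-- def _keep_row_market(market: str) -> bool:
--     # One char-by-char pass replaces the strip/lower/replace-chain/split/join
--     # normalization: lowercase each kept char, treat punctuation and whitespace
--     # alike as separators, collect the words directly; then a single
--     # left-to-right position scan checks all banned phrases at once.
--     words = []
--     cur = []
--     for ch in market:
--         if ch in "-_/.,()" or ch.isspace():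
--             if cur:
--                 words.append("".join(cur))
--                 cur = []
--         else:
--             cur.append(ch.lower())
--     if cur:
--         words.append("".join(cur))
--     text = " ".join(words)
--     for start in range(len(text)):
--         for token in _BANNED:
--             if text.startswith(token, start):
--                 return False
--     return True
-- ===== Notes on version B (the rewrite author's own statement) =====
-- stated objective: alternative
-- what changed: B normalizes in one char-by-char pass (lowercase kept chars, treat punctuation and whitespace alike as word separators) instead of A's strip/lower/seven-replace/split/join pipeline, and replaces A's eleven independent whole-string substring tests by one left-to-right position scan that checks every banned phrase at each position.
import Mathlib
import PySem

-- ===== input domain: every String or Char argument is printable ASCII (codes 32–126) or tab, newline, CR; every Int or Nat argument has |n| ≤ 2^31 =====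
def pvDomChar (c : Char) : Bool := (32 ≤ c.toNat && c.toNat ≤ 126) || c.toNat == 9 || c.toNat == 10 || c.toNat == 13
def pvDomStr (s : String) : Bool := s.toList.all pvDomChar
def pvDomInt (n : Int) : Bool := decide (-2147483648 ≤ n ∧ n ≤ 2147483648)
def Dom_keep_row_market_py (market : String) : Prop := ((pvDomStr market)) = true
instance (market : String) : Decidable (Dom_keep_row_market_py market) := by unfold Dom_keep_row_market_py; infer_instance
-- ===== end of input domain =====

-- B normalizes in one char-by-char pass (lowercase kept chars, punctuation and whitespace
-- alike as word separators) instead of A's strip/lower/replace-chain/split/join pipeline,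
-- and replaces A's eleven whole-string substring tests by one left-to-right position scan
-- (objective: alternative).

-- ===== PORT A =====
-- literal port of _norm_text (value : str here; the 'value is None' branch cannot fire on a String)
def norm_text_py (value : String) : String :=
  let text := PySem.Str.lower (PySem.Str.strip value)
  let text := ["-", "_", "/", ".", ",", "(", ")"].foldl
    (fun t tok => PySem.Str.replace t tok " ") text
  PySem.Str.join " " (PySem.Str.split₀ text)

def pvBannedA : List String :=
  ["series", "award", "awards", "special", "specials", "conference",
   "season", "champion", "rookie of the year", "cy young", "mvp"]

def keep_row_market_py (market : String) : Bool :=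
  let text := norm_text_py market
  ! (pvBannedA.any (fun token => PySem.Str.isIn token text))

-- ===== PORT B =====
-- 'ch in "-_/.,()" or ch.isspace()'
def pvIsSep (c : Char) : Bool :=
  ['-', '_', '/', '.', ',', '(', ')'].contains c || PySem.Chars.isspace c

-- the 'for ch in market' loop of Source B: builds the word list in one pass
def pvWordsLoop : List Char → List Char → List (List Char) → List (List Char)
  | [], cur, words => if cur.isEmpty then words else words ++ [cur]
  | c :: rest, cur, words =>
      if pvIsSep c then
        if cur.isEmpty then pvWordsLoop rest [] words
        else pvWordsLoop rest [] (words ++ [cur])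
      else pvWordsLoop rest (cur ++ [PySem.Chars.lowerChar c]) words

def pvBannedB : List (List Char) :=
  ["series".toList, "award".toList, "awards".toList, "special".toList,
   "specials".toList, "conference".toList, "season".toList, "champion".toList,
   "rookie of the year".toList, "cy young".toList, "mvp".toList]

-- 'for start in range(len(text)): for token in _BANNED: if text.startswith(token, start)'
def pvScanBanned : List Char → Bool
  | [] => false
  | c :: rest =>
      pvBannedB.any (fun token => PySem.Chars.startswith (c :: rest) token)
      || pvScanBanned rest

def keep_row_market_py_alt (market : String) : Bool :=
  let text := PySem.Chars.join [' '] (pvWordsLoop market.toList [] [])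
  ! pvScanBanned text

-- ===== PRECONDITION & SPEC =====
def Spec_keep_row_market_py (market : String) (out : Bool) : Prop := out = keep_row_market_py_alt market
instance (market : String) (out : Bool) : Decidable (Spec_keep_row_market_py market out) := by unfold Spec_keep_row_market_py; infer_instance

-- ===== CLAIM (what is proved, stated in full; the proofs are below) =====
def Claim_equal_keep_row_market_py : Prop := ∀ (market : String), Dom_keep_row_market_py market → Spec_keep_row_market_py market (keep_row_market_py market)

-- ===== LEMMAS AND PROOFS =====

-- the seven punctuation characters A replaces by spaces
def pvPuncts : List Char := ['-', '_', '/', '.', ',', '(', ')']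

-- pointwise effect of A's lower + seven replaces
def pvF (c : Char) : Char :=
  if c ∈ pvPuncts then ' ' else PySem.Chars.lowerChar c

theorem pv_char_eq_of_toNat (a b : Char) (h : a.toNat = b.toNat) : a = b :=
  Char.ext (UInt32.toNat_inj.mp h)

theorem pv_toNat_lowerChar (c : Char) :
    (PySem.Chars.lowerChar c).toNat
      = if 65 ≤ c.toNat ∧ c.toNat ≤ 90 then c.toNat + 32 else c.toNat := by
  rw [PySem.Chars.lowerChar, PySem.Chars.isupper]
  by_cases h1 : ('A' : Char) ≤ c
  · by_cases h2 : c ≤ 'Z'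
    · have n1 : 65 ≤ c.toNat := h1
      have n2 : c.toNat ≤ 90 := h2
      rw [if_pos (by simp [h1, h2]), if_pos ⟨n1, n2⟩, Char.toNat_ofNat,
        if_pos (Or.inl (by omega))]
    · have n2 : ¬ c.toNat ≤ 90 := fun hh => h2 hh
      rw [if_neg (by simp [h2]), if_neg (fun hn => n2 hn.2)]
  · have n1 : ¬ 65 ≤ c.toNat := fun hh => h1 hh
    rw [if_neg (by simp [h1]), if_neg (fun hn => n1 hn.1)]

theorem pv_isspace_lowerChar (c : Char) :
    PySem.Chars.isspace (PySem.Chars.lowerChar c) = PySem.Chars.isspace c := by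
  rw [Bool.eq_iff_iff]
  simp only [PySem.Chars.isspace, pv_toNat_lowerChar, Bool.or_eq_true, Bool.and_eq_true,
    decide_eq_true_eq]
  split_ifs with hr
  · omega
  · exact Iff.rfl

theorem pv_isspace_not_punct {c : Char} (h : PySem.Chars.isspace c = true) : c ∉ pvPuncts := by
  intro hmem
  simp only [pvPuncts, List.mem_cons, List.not_mem_nil, or_false] at hmem
  rcases hmem with rfl|rfl|rfl|rfl|rfl|rfl|rfl <;> simp [PySem.Chars.isspace] at h

theorem pv_pvF_of_isspace {c : Char} (h : PySem.Chars.isspace c = true) : pvF c = c := by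
  rw [pvF, if_neg (pv_isspace_not_punct h)]
  apply pv_char_eq_of_toNat
  rw [pv_toNat_lowerChar]
  rw [if_neg]
  intro hn
  simp only [PySem.Chars.isspace, Bool.or_eq_true, Bool.and_eq_true, decide_eq_true_eq] at h
  omega

theorem pv_lowerChar_not_punct {c : Char} (hc : c ∉ pvPuncts) :
    ∀ p ∈ pvPuncts, ¬ (PySem.Chars.lowerChar c = p) := by
  intro p hp heq
  have ht := congrArg Char.toNat heq
  rw [pv_toNat_lowerChar] at ht
  have hne : c.toNat ≠ p.toNat := fun he => hc (by rwa [pv_char_eq_of_toNat _ _ he])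
  have hlt : p.toNat < 97 := by
    simp only [pvPuncts, List.mem_cons, List.not_mem_nil, or_false] at hp
    rcases hp with rfl|rfl|rfl|rfl|rfl|rfl|rfl <;> decide
  split_ifs at ht with hr
  · omega
  · exact hne ht

-- two stacked maps fused into one (List.map_map with the composition written out)
theorem pv_map_fuse (f g : Char → Char) (l : List Char) :
    (l.map f).map g = l.map (fun c => g (f c)) := by
  rw [List.map_map]; rfl

theorem pv_replace_go_single (a b : Char) :
    ∀ (fuel : Nat) (l acc : List Char), l.length ≤ fuel →
      PySem.Chars.replace.go [a] [b] fuel l acc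
        = acc.reverse ++ l.map (fun c => if c == a then b else c) := by
  intro fuel
  induction fuel with
  | zero =>
      intro l acc h
      have : l = [] := List.eq_nil_of_length_eq_zero (Nat.le_zero.mp h)
      subst this
      simp [PySem.Chars.replace.go]
  | succ n ih =>
      intro l acc h
      cases l with
      | nil => simp [PySem.Chars.replace.go]
      | cons c t =>
          simp only [PySem.Chars.replace.go, List.isPrefixOf, Bool.and_true]
          by_cases hca : (a == c) = true
          · rw [if_pos hca]
            have hac : c = a := ((beq_iff_eq).mp hca).symm
            simp only [List.length_cons, List.drop_succ_cons, List.drop_zero,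
              List.reverse_cons, List.reverse_nil, List.nil_append, List.length_nil,
              List.singleton_append]
            rw [ih t (b :: acc) (by simpa using Nat.le_of_succ_le_succ h)]
            simp [hac]
          · rw [if_neg hca]
            rw [ih t (c :: acc) (by simpa using Nat.le_of_succ_le_succ h)]
            have hcb : ¬ (c = a) := fun he => hca (by simp [he])
            simp [hcb]

theorem pv_replace_single (l : List Char) (a b : Char) :
    PySem.Chars.replace l [a] [b] = l.map (fun c => if c == a then b else c) := by
  rw [PySem.Chars.replace]
  simp only [List.isEmpty_cons, if_false, Bool.false_eq_true]
  rw [pv_replace_go_single a b l.length l [] (le_refl _)]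
  simp

theorem pv_split₀_go_cons_space {c : Char} (hc : PySem.Chars.isspace c = true)
    (l : List Char) (acc : List (List Char)) :
    PySem.Chars.split₀.go (c :: l) [] acc = PySem.Chars.split₀.go l [] acc := by
  simp [PySem.Chars.split₀.go, hc]

theorem pv_split₀_spaces_append (ws l : List Char) (h : ∀ c ∈ ws, PySem.Chars.isspace c = true) :
    PySem.Chars.split₀ (ws ++ l) = PySem.Chars.split₀ l := by
  induction ws with
  | nil => simp
  | cons c t ih =>
      rw [List.cons_append, PySem.Chars.split₀, PySem.Chars.split₀,
        pv_split₀_go_cons_space (h c (List.mem_cons_self)) ]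
      exact ih (fun d hd => h d (List.mem_cons_of_mem _ hd))

theorem pv_split₀_go_append_space {c : Char} (hc : PySem.Chars.isspace c = true) :
    ∀ (l cur : List Char) (acc : List (List Char)),
      PySem.Chars.split₀.go (l ++ [c]) cur acc = PySem.Chars.split₀.go l cur acc := by
  intro l
  induction l with
  | nil =>
      intro cur acc
      simp only [List.nil_append, PySem.Chars.split₀.go, hc]
      by_cases hcur : cur.isEmpty <;> simp [hcur, PySem.Chars.split₀.go]
  | cons d t ih =>
      intro cur acc
      simp only [List.cons_append, PySem.Chars.split₀.go]
      split_ifs <;> rw [ih]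

theorem pv_split₀_append_spaces (l ws : List Char) (h : ∀ c ∈ ws, PySem.Chars.isspace c = true) :
    PySem.Chars.split₀ (l ++ ws) = PySem.Chars.split₀ l := by
  induction ws generalizing l with
  | nil => simp
  | cons c t ih =>
      have e : l ++ c :: t = (l ++ [c]) ++ t := by simp
      rw [e, ih (l ++ [c]) (fun d hd => h d (List.mem_cons_of_mem _ hd)),
        PySem.Chars.split₀, PySem.Chars.split₀,
        pv_split₀_go_append_space (h c List.mem_cons_self) l [] []]

theorem pv_strip_decomp (cs : List Char) :
    ∃ ws1 ws2 : List Char, (∀ c ∈ ws1, PySem.Chars.isspace c = true) ∧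
      (∀ c ∈ ws2, PySem.Chars.isspace c = true) ∧
      cs = ws1 ++ PySem.Chars.strip cs ++ ws2 := by
  refine ⟨cs.takeWhile PySem.Chars.isspace,
    ((PySem.Chars.lstrip cs).reverse.takeWhile PySem.Chars.isspace).reverse,
    fun c hc => List.mem_takeWhile_imp hc,
    fun c hc => List.mem_takeWhile_imp (List.mem_reverse.mp hc), ?_⟩
  have hl : PySem.Chars.lstrip cs = PySem.Chars.strip cs
      ++ ((PySem.Chars.lstrip cs).reverse.takeWhile PySem.Chars.isspace).reverse := by
    rw [PySem.Chars.strip, PySem.Chars.rstrip]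
    conv_lhs => rw [← List.reverse_reverse (PySem.Chars.lstrip cs),
      ← List.takeWhile_append_dropWhile (p := PySem.Chars.isspace)
        (l := (PySem.Chars.lstrip cs).reverse)]
    rw [List.reverse_append]
  conv_lhs => rw [← List.takeWhile_append_dropWhile (p := PySem.Chars.isspace) (l := cs),
    show List.dropWhile PySem.Chars.isspace cs = PySem.Chars.lstrip cs from rfl, hl]
  exact (List.append_assoc _ _ _).symm

theorem pv_map_pvF_spaces (ws : List Char) (h : ∀ c ∈ ws, PySem.Chars.isspace c = true) :
    ws.map pvF = ws := by
  rw [List.map_congr_left (fun a ha => pv_pvF_of_isspace (h a ha))]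
  simp

theorem pv_split₀_map_strip (cs : List Char) :
    PySem.Chars.split₀ ((PySem.Chars.strip cs).map pvF)
      = PySem.Chars.split₀ (cs.map pvF) := by
  obtain ⟨ws1, ws2, h1, h2, hdec⟩ := pv_strip_decomp cs
  conv_rhs => rw [hdec]
  rw [List.map_append, List.map_append, pv_map_pvF_spaces ws1 h1, pv_map_pvF_spaces ws2 h2,
    List.append_assoc, pv_split₀_spaces_append ws1 _ h1, pv_split₀_append_spaces _ ws2 h2]

theorem pv_isspace_pvF (c : Char) : PySem.Chars.isspace (pvF c) = pvIsSep c := by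
  by_cases h : c ∈ pvPuncts
  · simp only [pvPuncts, List.mem_cons, List.not_mem_nil, or_false] at h
    rcases h with rfl|rfl|rfl|rfl|rfl|rfl|rfl <;> decide
  · have h' := h
    simp only [pvPuncts, List.mem_cons, List.not_mem_nil, or_false] at h'
    simp [pvF, pvIsSep, h, h', pv_isspace_lowerChar]

theorem pv_pvF_of_not_sep {c : Char} (h : pvIsSep c = false) :
    pvF c = PySem.Chars.lowerChar c := by
  rw [pvF, if_neg]
  intro hmem
  rw [pvIsSep] at h
  simp only [Bool.or_eq_false_iff] at h
  have := h.1
  simp only [pvPuncts] at hmem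
  simp [hmem] at this

theorem pv_isEmpty_reverse (l : List Char) : l.reverse.isEmpty = l.isEmpty := by
  rw [Bool.eq_iff_iff, List.isEmpty_iff, List.isEmpty_iff, List.reverse_eq_nil_iff]

theorem pv_wordsLoop_append (cs : List Char) :
    ∀ (cur : List Char) (w : List (List Char)),
      pvWordsLoop cs cur w = w ++ pvWordsLoop cs cur [] := by
  induction cs with
  | nil =>
      intro cur w
      simp only [pvWordsLoop]
      split_ifs <;> simp
  | cons c t ih =>
      intro cur w
      simp only [pvWordsLoop]
      split_ifs with h1 h2
      · exact ih [] w
      · rw [ih [] (w ++ [cur]), ih [] ([] ++ [cur])]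
        simp
      · exact ih _ w

theorem pv_go_eq_wordsLoop (cs : List Char) :
    ∀ (cur : List Char) (acc : List (List Char)),
      PySem.Chars.split₀.go (cs.map pvF) cur acc
        = acc.reverse ++ pvWordsLoop cs cur.reverse [] := by
  induction cs with
  | nil =>
      intro cur acc
      simp only [List.map_nil, PySem.Chars.split₀.go, pvWordsLoop, pv_isEmpty_reverse]
      split_ifs <;> simp
  | cons c t ih =>
      intro cur acc
      simp only [List.map_cons, PySem.Chars.split₀.go, pvWordsLoop, pv_isspace_pvF,
        pv_isEmpty_reverse]
      by_cases hs : pvIsSep c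
      · rw [if_pos hs, if_pos hs]
        by_cases hcur : cur.isEmpty
        · rw [if_pos hcur, if_pos hcur]
          have : cur = [] := List.isEmpty_iff.mp hcur
          subst this
          exact ih [] acc
        · rw [if_neg hcur, if_neg hcur]
          rw [ih [] (cur.reverse :: acc), pv_wordsLoop_append t [] ([] ++ [cur.reverse])]
          simp
      · rw [if_neg hs, if_neg hs, ih (pvF c :: cur) acc, pv_pvF_of_not_sep (Bool.eq_false_iff.mpr hs)]
        simp

-- the scan of B finds a banned token iff one is an infix
theorem pv_scan_iff (cs : List Char) :
    pvScanBanned cs = true ↔ ∃ t ∈ pvBannedB, t <:+: cs := by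
  induction cs with
  | nil =>
      simp only [pvScanBanned]
      constructor
      · intro h; exact absurd h (by decide)
      · rintro ⟨t, ht, hinf⟩
        rw [List.eq_nil_of_infix_nil hinf] at ht
        exact absurd ht (by decide)
  | cons c rest ih =>
      simp only [pvScanBanned, Bool.or_eq_true, List.any_eq_true, ih,
        PySem.Chars.startswith_iff]
      constructor
      · rintro (⟨t, ht, hp⟩ | ⟨t, ht, hinf⟩)
        · exact ⟨t, ht, hp.isInfix⟩
        · exact ⟨t, ht, hinf.trans (List.suffix_cons c rest).isInfix⟩
      · rintro ⟨t, ht, hinf⟩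
        rcases List.infix_cons_iff.mp hinf with hp | hinf'
        · exact Or.inl ⟨t, ht, hp⟩
        · exact Or.inr ⟨t, ht, hinf'⟩

theorem pv_bannedB_eq : pvBannedB = pvBannedA.map String.toList := by decide

theorem pv_any_isIn_eq_scan (s : String) :
    pvBannedA.any (fun token => PySem.Str.isIn token s) = pvScanBanned s.toList := by
  rw [Bool.eq_iff_iff, List.any_eq_true, pv_scan_iff]
  constructor
  · rintro ⟨t, ht, h⟩
    exact ⟨t.toList, by rw [pv_bannedB_eq]; exact List.mem_map_of_mem ht,
      (PySem.Str.isIn_iff_infix t s).mp h⟩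
  · rintro ⟨tl, htl, h⟩
    rw [pv_bannedB_eq] at htl
    obtain ⟨t, ht, rfl⟩ := List.mem_map.mp htl
    exact ⟨t, ht, (PySem.Str.isIn_iff_infix t s).mpr h⟩

theorem pv_normA_eq (market : String) :
    (norm_text_py market).toList
      = PySem.Chars.join [' '] (pvWordsLoop market.toList [] []) := by
  have es : (" " : String).toList = [' '] := rfl
  have e1 : ("-" : String).toList = ['-'] := rfl
  have e2 : ("_" : String).toList = ['_'] := rfl
  have e3 : ("/" : String).toList = ['/'] := rfl
  have e4 : ("." : String).toList = ['.'] := rfl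
  have e5 : ("," : String).toList = [','] := rfl
  have e6 : ("(" : String).toList = ['('] := rfl
  have e7 : (")" : String).toList = [')'] := rfl
  rw [norm_text_py]
  simp only [List.foldl_cons, List.foldl_nil]
  rw [PySem.Str.toList_join, PySem.Str.split₀_map_toList, PySem.Str.toList_replace,
    PySem.Str.toList_replace, PySem.Str.toList_replace, PySem.Str.toList_replace,
    PySem.Str.toList_replace, PySem.Str.toList_replace, PySem.Str.toList_replace,
    PySem.Str.toList_lower, PySem.Str.toList_strip, es, e1, e2, e3, e4, e5, e6, e7]
  rw [pv_replace_single, pv_replace_single, pv_replace_single, pv_replace_single,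
    pv_replace_single, pv_replace_single, pv_replace_single]
  have hmap : ∀ l : List Char,
      (((((((l.map PySem.Chars.lowerChar).map (fun c => if c == '-' then ' ' else c)).map
        (fun c => if c == '_' then ' ' else c)).map
        (fun c => if c == '/' then ' ' else c)).map
        (fun c => if c == '.' then ' ' else c)).map
        (fun c => if c == ',' then ' ' else c)).map
        (fun c => if c == '(' then ' ' else c)).map
        (fun c => if c == ')' then ' ' else c) = l.map pvF := by
    intro l
    rw [pv_map_fuse, pv_map_fuse, pv_map_fuse, pv_map_fuse, pv_map_fuse, pv_map_fuse,
      pv_map_fuse]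
    apply List.map_congr_left
    intro a _
    by_cases h : a ∈ pvPuncts
    · simp only [pvPuncts, List.mem_cons, List.not_mem_nil, or_false] at h
      rcases h with rfl|rfl|rfl|rfl|rfl|rfl|rfl <;> decide
    · have hne := pv_lowerChar_not_punct h
      have e1 : (PySem.Chars.lowerChar a == '-') = false := by
        simp [hne '-' (by simp [pvPuncts])]
      have e2 : (PySem.Chars.lowerChar a == '_') = false := by
        simp [hne '_' (by simp [pvPuncts])]
      have e3 : (PySem.Chars.lowerChar a == '/') = false := by
        simp [hne '/' (by simp [pvPuncts])]
      have e4 : (PySem.Chars.lowerChar a == '.') = false := by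
        simp [hne '.' (by simp [pvPuncts])]
      have e5 : (PySem.Chars.lowerChar a == ',') = false := by
        simp [hne ',' (by simp [pvPuncts])]
      have e6 : (PySem.Chars.lowerChar a == '(') = false := by
        simp [hne '(' (by simp [pvPuncts])]
      have e7 : (PySem.Chars.lowerChar a == ')') = false := by
        simp [hne ')' (by simp [pvPuncts])]
      simp [pvF, h, e1, e2, e3, e4, e5, e6, e7]
  simp only [PySem.Chars.lower]
  rw [hmap, pv_split₀_map_strip, PySem.Chars.split₀, pv_go_eq_wordsLoop market.toList [] []]
  simp

-- ===== VERDICT (by name: the statement is the Claim_ definition above) =====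
theorem keep_row_market_py_spec : Claim_equal_keep_row_market_py := by
  intro market _
  show keep_row_market_py market = keep_row_market_py_alt market
  simp only [keep_row_market_py, keep_row_market_py_alt]
  rw [pv_any_isIn_eq_scan, pv_normA_eq]
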